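-- pv_equiv track=rewrite | github.com/vukien199x/detect_bot | handle_data_log.py | get_data_train
-- ===== SOURCE A (Python) =====
-- action_types = [0, 1, 2, 3, 4, 5, 6, 7, 8, 9, 10, 11, 12, 13, 14, 15, 16, 17, 18, 19, 100, 101,
--                 103, 104, 106, 107, 200, 201, 202, 203, 204, 205, 206, 207, 208, 1000]
--
-- def get_data_train(dict_action, type_train):
--     result = []
--     for action_type in action_types:
--         if action_type in dict_action:
--             if type_train == 'Mul':
--                 result.append(dict_action[action_type])
--             else:
--                 result.append(1)
--         else:
--             result.append(0)
--     return result
-- ===== SOURCE B (Python) =====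
-- action_types = [0, 1, 2, 3, 4, 5, 6, 7, 8, 9, 10, 11, 12, 13, 14, 15, 16, 17, 18, 19, 100, 101,
--                 103, 104, 106, 107, 200, 201, 202, 203, 204, 205, 206, 207, 208, 1000]
--
-- action_index = {t: i for i, t in enumerate(action_types)}
--
-- def get_data_train(dict_action, type_train):
--     result = [0] * len(action_types)
--     for key, value in dict_action.items():
--         i = action_index.get(key)
--         if i is not None:
--             result[i] = value if type_train == 'Mul' else 1
--     return result
-- ===== Notes on version B (the rewrite author's own statement) =====
-- stated objective: alternative
-- what changed: B precomputes an {action_type: position} index map once and scatters the dict's entries into a preallocated zero vector in a single pass over the dict, instead of A's gather loop over the 36 fixed action types with a membership test and lookup per slot.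
import Mathlib
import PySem

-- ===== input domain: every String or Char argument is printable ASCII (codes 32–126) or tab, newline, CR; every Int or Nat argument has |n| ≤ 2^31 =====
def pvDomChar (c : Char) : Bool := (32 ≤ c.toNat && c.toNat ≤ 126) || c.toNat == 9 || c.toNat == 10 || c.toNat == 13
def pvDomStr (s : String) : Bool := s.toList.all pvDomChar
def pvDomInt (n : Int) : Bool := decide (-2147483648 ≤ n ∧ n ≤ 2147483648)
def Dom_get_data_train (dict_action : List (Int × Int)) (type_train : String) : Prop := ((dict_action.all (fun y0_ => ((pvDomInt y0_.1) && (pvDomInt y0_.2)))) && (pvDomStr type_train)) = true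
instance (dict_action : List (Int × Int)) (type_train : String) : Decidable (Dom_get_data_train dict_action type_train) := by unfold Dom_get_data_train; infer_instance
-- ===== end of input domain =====

-- B scatters the dict entries into a preallocated zero vector through a precomputed
-- {action_type: position} index, instead of A's gather pass over the fixed action-type
-- list with a membership test per slot (objective: alternative decomposition).

-- ===== PORT A =====
def actionTypes : List Int := [0, 1, 2, 3, 4, 5, 6, 7, 8, 9, 10, 11, 12, 13, 14, 15, 16, 17, 18, 19, 100, 101,
                103, 104, 106, 107, 200, 201, 202, 203, 204, 205, 206, 207, 208, 1000]

def get_data_train (dict_action : List (Int × Int)) (type_train : String) : List Int :=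
  actionTypes.foldl (fun result action_type =>
    if (PySem.Dict.mk dict_action).contains action_type then
      if type_train = "Mul" then
        result ++ [(PySem.Dict.mk dict_action).getD action_type 0]
      else
        result ++ [1]
    else
      result ++ [0]) []

-- ===== PORT B =====
def actionIndex : PySem.Dict Int Int :=
  (PySem.List.enumerate actionTypes).foldl (fun d p => d.insert p.2 p.1) PySem.Dict.empty

def get_data_train_alt (dict_action : List (Int × Int)) (type_train : String) : List Int :=
  dict_action.foldl (fun result kv =>
    match actionIndex.get? kv.1 with
    | some i => PySem.List.pySetD result i (if type_train = "Mul" then kv.2 else 1)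
    | none => result) (List.replicate actionTypes.length 0)

-- ===== PRECONDITION & SPEC =====
-- Pre_ excludes association lists with duplicate keys: a Python dict cannot contain a
-- duplicate key, so such lists represent no Python input at all, and the first-match /
-- last-write disagreement between the two ports there is an artefact of the encoding.
def Pre_get_data_train (dict_action : List (Int × Int)) (type_train : String) : Prop :=
  (dict_action.map Prod.fst).Nodup
instance (dict_action : List (Int × Int)) (type_train : String) : Decidable (Pre_get_data_train dict_action type_train) := by unfold Pre_get_data_train; infer_instance
def pvWitness_get_data_train : (List (Int × Int)) × String := ([(1, 5), (100, -2)], "Mul")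

def Spec_get_data_train (dict_action : List (Int × Int)) (type_train : String) (out : List Int) : Prop := out = get_data_train_alt dict_action type_train
instance (dict_action : List (Int × Int)) (type_train : String) (out : List Int) : Decidable (Spec_get_data_train dict_action type_train out) := by unfold Spec_get_data_train; infer_instance

-- ===== CLAIM (what is proved, stated in full; the proofs are below) =====
def Claim_equal_get_data_train : Prop := ∀ (dict_action : List (Int × Int)) (type_train : String), Dom_get_data_train dict_action type_train → Pre_get_data_train dict_action type_train → Spec_get_data_train dict_action type_train (get_data_train dict_action type_train)

-- ===== LEMMAS AND PROOFS =====

-- the per-slot value both programs compute for an action type t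
def pvVal (dict_action : List (Int × Int)) (type_train : String) (t : Int) : Int :=
  match (PySem.Dict.mk dict_action).get? t with
  | some v => if type_train = "Mul" then v else 1
  | none => 0

lemma pv_len : actionTypes.length = 36 := by decide

lemma pv_nodup : actionTypes.Nodup := by decide

set_option maxRecDepth 8192 in
lemma pv_keys : actionIndex.keys = actionTypes := by decide

set_option maxRecDepth 8192 in
lemma pv_idx : ∀ n : Nat, n < 36 → actionIndex.get? (actionTypes.getD n 0) = some (n : Int) := by decide

lemma pv_mem_inv (k i : Int) (hi : actionIndex.get? k = some i) :
    ∃ n : Nat, n < 36 ∧ i = (n : Int) ∧ actionTypes.getD n 0 = k := by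
  have hk : k ∈ actionIndex.keys := by
    by_contra h
    simp [(PySem.Dict.get?_eq_none_iff_not_mem_keys _ _).2 h] at hi
  rw [pv_keys] at hk
  obtain ⟨n, hn, he⟩ := List.getElem_of_mem hk
  have hn36 : n < 36 := by simpa [pv_len] using hn
  have hg : actionTypes.getD n 0 = k := by rw [List.getD_eq_getElem _ _ hn, he]
  have := pv_idx n hn36
  rw [hg, hi] at this
  exact ⟨n, hn36, Option.some.inj this, hg⟩

-- A gathers: the fold appends pvVal for each action type
lemma pv_foldA (dict_action : List (Int × Int)) (type_train : String) :
    ∀ (l : List Int) (init : List Int),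
      l.foldl (fun result action_type =>
        if (PySem.Dict.mk dict_action).contains action_type then
          if type_train = "Mul" then
            result ++ [(PySem.Dict.mk dict_action).getD action_type 0]
          else
            result ++ [1]
        else
          result ++ [0]) init = init ++ l.map (pvVal dict_action type_train) := by
  intro l
  induction l with
  | nil => intro init; simp
  | cons t l ih =>
    intro init
    rw [List.foldl_cons, ih]
    have hstep : (if (PySem.Dict.mk dict_action).contains t then
          if type_train = "Mul" then
            init ++ [(PySem.Dict.mk dict_action).getD t 0]
          else
            init ++ [1]
        else
          init ++ [0]) = init ++ [pvVal dict_action type_train t] := by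
      rcases h : (PySem.Dict.mk dict_action).get? t with _ | v
      · simp [pvVal, h, PySem.Dict.contains_eq_isSome_get?]
      · simp only [pvVal, h, PySem.Dict.contains_eq_isSome_get?, Option.isSome_some,
          PySem.Dict.getD_eq_get?_getD, Option.getD_some, if_true]
        split_ifs <;> rfl
    rw [hstep, List.map_cons, List.append_assoc]
    rfl

lemma pv_foldB_len (type_train : String) :
    ∀ (l : List (Int × Int)) (result : List Int),
      (l.foldl (fun result kv =>
        match actionIndex.get? kv.1 with
        | some i => PySem.List.pySetD result i (if type_train = "Mul" then kv.2 else 1)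
        | none => result) result).length = result.length := by
  intro l
  induction l with
  | nil => intro result; rfl
  | cons kv l ih =>
    intro result
    rw [List.foldl_cons]
    rcases hi : actionIndex.get? kv.1 with _ | i
    · simp only; exact ih result
    · simp only; rw [ih]; exact PySem.List.length_pySetD ..

-- B scatters: the fold's slot j holds pvVal of the j-th action type (first-match = the
-- unique match, thanks to the Nodup hypothesis)
lemma pv_foldB (type_train : String) :
    ∀ (l : List (Int × Int)), (l.map Prod.fst).Nodup →
      ∀ (result : List Int), result.length = 36 → ∀ j, j < 36 →
        (l.foldl (fun result kv =>
          match actionIndex.get? kv.1 with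
          | some i => PySem.List.pySetD result i (if type_train = "Mul" then kv.2 else 1)
          | none => result) result).getD j 0
        = match (PySem.Dict.mk l).get? (actionTypes.getD j 0) with
          | some w => if type_train = "Mul" then w else 1
          | none => result.getD j 0 := by
  intro l
  induction l with
  | nil =>
    intro _ result _ j _
    simp [PySem.Dict.get?]
  | cons kv l ih =>
    intro hnd result hlen j hj
    rw [List.map_cons, List.nodup_cons] at hnd
    have hk : kv.1 ∉ l.map Prod.fst := hnd.1
    have hnd' : (l.map Prod.fst).Nodup := hnd.2
    have hjlen : j < actionTypes.length := by rw [pv_len]; exact hj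
    have hmemj : actionTypes.getD j 0 ∈ actionTypes := by
      rw [List.getD_eq_getElem _ _ hjlen]; exact List.getElem_mem _
    rw [List.foldl_cons]
    rcases hi : actionIndex.get? kv.1 with _ | i
    · -- key not an action type: entry ignored
      have hkne : (kv.1 == actionTypes.getD j 0) = false := by
        have hmem : kv.1 ∉ actionIndex.keys := (PySem.Dict.get?_eq_none_iff_not_mem_keys _ _).1 hi
        rw [pv_keys] at hmem
        simp only [beq_eq_false_iff_ne, ne_eq]
        intro he
        exact hmem (he ▸ hmemj)
      simp only
      rw [ih hnd' result hlen j hj, PySem.Dict.get?_mk_cons, hkne]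
      simp
    · -- key is actionTypes[n]: write slot n
      obtain ⟨n, hn36, rfl, hkn⟩ := pv_mem_inv kv.1 i hi
      have hnlen : n < actionTypes.length := by rw [pv_len]; exact hn36
      simp only
      rw [PySem.List.pySetD_natCast]
      have hlen' : (result.set n (if type_train = "Mul" then kv.2 else 1)).length = 36 := by
        rw [List.length_set]; exact hlen
      rw [ih hnd' _ hlen' j hj, PySem.Dict.get?_mk_cons]
      by_cases hkj : kv.1 = actionTypes.getD j 0
      · -- this entry's slot: j = n and the rest of l never touches it
        have hjn : j = n := by
          apply pv_nodup.getElem_inj_iff.1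
          rw [← List.getD_eq_getElem _ 0 hjlen, ← List.getD_eq_getElem _ 0 hnlen, hkn, hkj]
        have hnone : (PySem.Dict.mk l).get? (actionTypes.getD j 0) = none := by
          apply (PySem.Dict.get?_eq_none_iff_not_mem_keys _ _).2
          rw [hjn, hkn]
          simpa [PySem.Dict.keys] using hk
        rw [hnone]
        simp only [hkj, beq_self_eq_true, if_true]
        subst hjn
        rw [List.getD_eq_getElem _ 0 (by rw [hlen']; exact hj), List.getElem_set_self]
      · -- another slot: the write at n is invisible at j
        have hjn : j ≠ n := by
          intro he
          exact hkj (by rw [hkn.symm, he])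
        have hbeq : (kv.1 == actionTypes.getD j 0) = false := by simpa using hkj
        rw [hbeq]
        rcases hw : (PySem.Dict.mk l).get? (actionTypes.getD j 0) with _ | w
        · simp only
          rw [List.getD_eq_getElem _ 0 (by rw [hlen']; exact hj),
            List.getD_eq_getElem _ 0 (by rw [hlen]; exact hj)]
          exact List.getElem_set_ne (by omega) ..
        · simp

lemma pv_A_char (dict_action : List (Int × Int)) (type_train : String) :
    get_data_train dict_action type_train = actionTypes.map (pvVal dict_action type_train) := by
  rw [get_data_train, pv_foldA]
  rfl

-- ===== VERDICT (by name: the statement is the Claim_ definition above) =====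
theorem get_data_train_spec : Claim_equal_get_data_train := by
  unfold Claim_equal_get_data_train
  intro dict_action type_train _ hpre
  unfold Spec_get_data_train
  rw [pv_A_char]
  have hlenB : (get_data_train_alt dict_action type_train).length = 36 := by
    rw [get_data_train_alt, pv_foldB_len, List.length_replicate, pv_len]
  apply List.ext_getElem
  · rw [List.length_map, pv_len, hlenB]
  · intro j h1 h2
    have hj : j < 36 := by rw [hlenB] at h2; exact h2
    have hjlen : j < actionTypes.length := by rw [pv_len]; exact hj
    have hrep : (List.replicate actionTypes.length (0 : Int)).getD j 0 = 0 := by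
      rw [List.getD_eq_getElem _ 0 (by rw [List.length_replicate]; exact hjlen),
        List.getElem_replicate]
    have hB := pv_foldB type_train dict_action hpre
      (List.replicate actionTypes.length 0) (by rw [List.length_replicate, pv_len]) j hj
    rw [hrep] at hB
    rw [← List.getD_eq_getElem _ 0 h2]
    show _ = (get_data_train_alt dict_action type_train).getD j 0
    rw [get_data_train_alt, hB, List.getElem_map, pvVal, List.getD_eq_getElem _ 0 hjlen]
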